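-- pv_equiv track=rewrite | github.com/nlcuong85/cuongcv | application-system/scripts/generate_application.py | contribution_sentence
-- ===== SOURCE A (Python) =====
-- from typing import Any
--
-- def contribution_sentence(role: dict[str, Any]) -> str:
--     strengths = [str(item).strip() for item in role.get("cover_letter_strengths", []) if str(item).strip()]
--     if len(strengths) >= 3:
--         return f"I believe I can contribute most through {strengths[0]}, {strengths[1]}, and {strengths[2]}"
--     if len(strengths) == 2:
--         return f"I believe I can contribute most through {strengths[0]} and {strengths[1]}"
--     if len(strengths) == 1:
--         return f"I believe I can contribute most through {strengths[0]}"
--     return "I believe I can contribute most through structured business analysis, clear requirement definition, and reliable operational follow-through"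
-- ===== SOURCE B (Python) =====
-- DEFAULT_STRENGTHS = [
--     "structured business analysis",
--     "clear requirement definition",
--     "reliable operational follow-through",
-- ]
--
--
-- def _clause(picks):
--     # picks is always non-empty here
--     if len(picks) == 1:
--         return picks[0]
--     return ", ".join(picks[:-1]) + ("," if len(picks) > 2 else "") + " and " + picks[-1]
--
--
-- def contribution_sentence(role):
--     strengths = [s for s in (str(x).strip() for x in role.get("cover_letter_strengths", [])) if s]
--     picks = strengths[:3] or DEFAULT_STRENGTHS
--     return "I believe I can contribute most through " + _clause(picks)
-- ===== Notes on version B (the rewrite author's own statement) =====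
-- stated objective: simpler
-- what changed: B replaces A's four hardcoded sentence branches (including a fully spelled-out default sentence literal) by taking the first three filtered strengths, falling back to a default-strengths data list when empty, and building the clause with one generic Oxford-comma join.
import Mathlib
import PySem

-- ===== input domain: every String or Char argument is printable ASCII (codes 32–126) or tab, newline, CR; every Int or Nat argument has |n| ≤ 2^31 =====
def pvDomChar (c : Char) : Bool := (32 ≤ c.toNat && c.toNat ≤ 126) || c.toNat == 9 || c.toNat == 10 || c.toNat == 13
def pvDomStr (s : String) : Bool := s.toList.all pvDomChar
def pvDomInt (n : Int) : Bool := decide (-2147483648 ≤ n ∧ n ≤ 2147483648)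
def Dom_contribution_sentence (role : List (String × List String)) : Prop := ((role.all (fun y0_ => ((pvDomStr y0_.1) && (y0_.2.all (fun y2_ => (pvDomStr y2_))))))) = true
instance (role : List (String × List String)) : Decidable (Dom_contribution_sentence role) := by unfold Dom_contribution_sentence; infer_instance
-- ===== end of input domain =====

-- B folds the hardcoded default sentence into a data list and builds the clause with one generic
-- Oxford-comma join over the (at most three, or default) picks instead of four literal branches (objective: simpler).

-- role.get(key, []): first-match lookup in the association list (shared dict primitive)
def pvGet (role : List (String × List String)) (k : String) : List String :=
  match role with
  | [] => []
  | (k', v) :: rest => if k' = k then v else pvGet rest k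

-- ===== PORT A =====
def contribution_sentence (role : List (String × List String)) : String :=
  let strengths := ((pvGet role "cover_letter_strengths").filter
      (fun item => PySem.Str.strip item ≠ "")).map (fun item => PySem.Str.strip item)
  if strengths.length ≥ 3 then
    "I believe I can contribute most through " ++ PySem.List.pyGetD strengths 0 "" ++ ", " ++
      PySem.List.pyGetD strengths 1 "" ++ ", and " ++ PySem.List.pyGetD strengths 2 ""
  else if strengths.length = 2 then
    "I believe I can contribute most through " ++ PySem.List.pyGetD strengths 0 "" ++ " and " ++
      PySem.List.pyGetD strengths 1 ""
  else if strengths.length = 1 then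
    "I believe I can contribute most through " ++ PySem.List.pyGetD strengths 0 ""
  else
    "I believe I can contribute most through structured business analysis, clear requirement definition, and reliable operational follow-through"

-- ===== PORT B =====
def pvDefaultStrengths : List String :=
  ["structured business analysis", "clear requirement definition", "reliable operational follow-through"]

-- _clause: Oxford-comma join of a non-empty list of picks
def pvClause (picks : List String) : String :=
  if picks.length = 1 then PySem.List.pyGetD picks 0 ""
  else PySem.Str.join ", " (PySem.List.slice picks none (some (-1))) ++
    (if picks.length > 2 then "," else "") ++ " and " ++ PySem.List.pyGetD picks (-1) ""

def contribution_sentence_alt (role : List (String × List String)) : String :=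
  let strengths := ((pvGet role "cover_letter_strengths").map
      (fun x => PySem.Str.strip x)).filter (fun s => s ≠ "")
  let take3 := PySem.List.slice strengths none (some 3)
  let picks := if take3.isEmpty then pvDefaultStrengths else take3
  "I believe I can contribute most through " ++ pvClause picks

-- ===== PRECONDITION & SPEC =====
def Spec_contribution_sentence (role : List (String × List String)) (out : String) : Prop := out = contribution_sentence_alt role
instance (role : List (String × List String)) (out : String) : Decidable (Spec_contribution_sentence role out) := by unfold Spec_contribution_sentence; infer_instance

-- ===== CLAIM (what is proved, stated in full; the proofs are below) =====
def Claim_equal_contribution_sentence : Prop := ∀ (role : List (String × List String)), Dom_contribution_sentence role → Spec_contribution_sentence role (contribution_sentence role)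

-- ===== LEMMAS AND PROOFS =====

theorem pv_str_ext {a b : String} (h : a.toList = b.toList) : a = b := String.toList_inj.mp h

theorem pv_join_one (a : String) : PySem.Str.join ", " [a] = a :=
  pv_str_ext (by simp [PySem.Str.toList_join, PySem.Chars.join_singleton])

theorem pv_join_two (a b : String) : PySem.Str.join ", " [a, b] = a ++ ", " ++ b :=
  pv_str_ext (by simp [PySem.Str.toList_join, PySem.Chars.join_cons_cons, PySem.Chars.join_singleton])

-- the comprehension's filter/map commute: A filters then strips, B strips then filters
theorem pv_filter_map_comm (l : List String) :
    ((l.filter (fun item => PySem.Str.strip item ≠ "")).map (fun item => PySem.Str.strip item)) =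
    ((l.map (fun x => PySem.Str.strip x)).filter (fun s => s ≠ "")) := by
  induction l with
  | nil => rfl
  | cons x xs ih =>
    simp only [ne_eq, decide_not] at ih
    simp only [List.map_cons, List.filter_cons, ne_eq, decide_not]
    by_cases h : PySem.Str.strip x = "" <;> simp [h, ih]

-- re-associating the literal pieces of the Oxford comma
theorem pv_comma_and (c : String) : ("," : String) ++ (" and " ++ c) = ", and " ++ c := by
  rw [← String.append_assoc]; rfl

-- the branchy A-side sentence equals B's generic pick/clause construction, for any strengths list
set_option maxRecDepth 4000 in
theorem pv_main (s : List String) :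
    (if s.length ≥ 3 then
      "I believe I can contribute most through " ++ PySem.List.pyGetD s 0 "" ++ ", " ++
        PySem.List.pyGetD s 1 "" ++ ", and " ++ PySem.List.pyGetD s 2 ""
    else if s.length = 2 then
      "I believe I can contribute most through " ++ PySem.List.pyGetD s 0 "" ++ " and " ++
        PySem.List.pyGetD s 1 ""
    else if s.length = 1 then
      "I believe I can contribute most through " ++ PySem.List.pyGetD s 0 ""
    else
      "I believe I can contribute most through structured business analysis, clear requirement definition, and reliable operational follow-through") =
    "I believe I can contribute most through " ++
      pvClause (if (PySem.List.slice s none (some 3)).isEmpty then pvDefaultStrengths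
                else PySem.List.slice s none (some 3)) := by
  match s with
  | [] =>
      rw [if_neg (by simp), if_neg (by simp), if_neg (by simp)]
      rfl
  | [a] =>
      rw [if_neg (by norm_num), if_neg (by norm_num), if_pos (by norm_num)]
      have h3 : PySem.List.slice [a] none (some 3) = [a] := by
        simp [PySem.List.slice, PySem.List.clampIdx]
      rw [h3, if_neg (by simp), PySem.List.pyGetD_ofNat' [a] 0 ""]
      show "I believe I can contribute most through " ++ a = _
      have hcl : pvClause [a] = a := by
        rw [pvClause, if_pos (by simp), PySem.List.pyGetD_ofNat' [a] 0 ""]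
        rfl
      rw [hcl]
  | [a, b] =>
      rw [if_neg (by simp), if_pos (by simp)]
      have h3 : PySem.List.slice [a, b] none (some 3) = [a, b] := by
        simp [PySem.List.slice, PySem.List.clampIdx]
      rw [h3, if_neg (by simp), PySem.List.pyGetD_ofNat' [a, b] 0 "",
        PySem.List.pyGetD_ofNat' [a, b] 1 ""]
      show "I believe I can contribute most through " ++ a ++ " and " ++ b = _
      have hcl : pvClause [a, b] = a ++ " and " ++ b := by
        rw [pvClause, if_neg (by simp)]
        have hlast : PySem.List.pyGetD [a, b] (-1) "" = b := by
          simp [PySem.List.pyGetD, PySem.List.pyGet?, PySem.List.pyIdx?]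
        rw [if_neg (by simp), hlast, PySem.List.slice_to_neg_one]
        show PySem.Str.join ", " [a] ++ "" ++ " and " ++ b = a ++ " and " ++ b
        rw [pv_join_one]
        simp [String.append_assoc]
      rw [hcl]
      simp [String.append_assoc]
  | a :: b :: c :: rest =>
      have g0 : PySem.List.pyGetD (a :: b :: c :: rest) 0 "" = a := by
        rw [PySem.List.pyGetD_ofNat' _ 0 ""]; rfl
      have g1 : PySem.List.pyGetD (a :: b :: c :: rest) 1 "" = b := by
        rw [PySem.List.pyGetD_ofNat' _ 1 ""]; rfl
      have g2 : PySem.List.pyGetD (a :: b :: c :: rest) 2 "" = c := by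
        rw [PySem.List.pyGetD_ofNat' _ 2 ""]; rfl
      have h3 : PySem.List.slice (a :: b :: c :: rest) none (some 3) = [a, b, c] := by
        simp [PySem.List.slice, PySem.List.clampIdx, List.take_succ_cons]
      rw [if_pos (by simp), g0, g1, g2, h3, if_neg (by simp)]
      have hcl : pvClause [a, b, c] = a ++ ", " ++ b ++ (", and " ++ c) := by
        rw [pvClause, if_neg (by simp)]
        have hlast : PySem.List.pyGetD [a, b, c] (-1) "" = c := by
          simp [PySem.List.pyGetD, PySem.List.pyGet?, PySem.List.pyIdx?]
        rw [if_pos (by simp), hlast, PySem.List.slice_to_neg_one]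
        show PySem.Str.join ", " [a, b] ++ "," ++ " and " ++ c = a ++ ", " ++ b ++ (", and " ++ c)
        rw [pv_join_two]
        simp only [String.append_assoc, pv_comma_and]
      rw [hcl]
      simp [String.append_assoc]

-- ===== VERDICT (by name: the statement is the Claim_ definition above) =====
theorem contribution_sentence_spec : Claim_equal_contribution_sentence := by
  intro role _
  unfold Spec_contribution_sentence contribution_sentence contribution_sentence_alt
  rw [pv_filter_map_comm]
  exact pv_main _
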